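-- pv_equiv track=rewrite | github.com/krapeun/Programmers | Lv1/NewID.py | solution
-- ===== SOURCE A (Python) =====
-- def solution(new_id):
--     answer = ''
--
--     # lv1
--     new_id = new_id.lower()
--
--     # lv2
--     id_list = ['-', '_', '.']
--
--     for ID in new_id:
--         if 'a' <= ID <= 'z':
--             answer += ID
--         elif '0' <= ID <= '9':
--             answer += ID
--         elif ID in id_list:
--             answer += ID
--
--     # lv3
--     while '..' in answer:
--         answer = answer.replace('..', '.')
--
--     # lv4
--     if answer[0] == '.':
--         answer = answer[- (len(answer) - 1):]
--     if answer[-1] == '.':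
--         answer = answer[:len(answer) - 1]
--
--     # lv5
--     if len(answer) == 0:
--         answer += 'a'
--
--     # lv6
--     if len(answer) > 15:
--         answer = answer[:15]
--     if answer[-1] == '.':
--         answer = answer[:len(answer) - 1]
--
--     # lv7
--     while len(answer) <= 2:
--         answer += answer[-1]
--
--     return answer
-- ===== SOURCE B (Python) =====
-- def solution(new_id):
--     # one pass: lowercase, filter allowed chars, collapse consecutive dots as we go
--     buf = []
--     for ch in new_id:
--         c = ch.lower()
--         if (c.isalnum() or c in '-_.') and not (c == '.' and buf and buf[-1] == '.'):
--             buf.append(c)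
--     core = ''.join(buf).strip('.')
--     if not core:
--         core = 'a'
--     core = core[:15].strip('.')
--     if len(core) < 3:
--         core += core[-1] * (3 - len(core))
--     return core
-- ===== Notes on version B (the rewrite author's own statement) =====
-- stated objective: alternative
-- what changed: One fused pass that lowercases, filters and collapses consecutive dots while building the string, replacing A's separate filter loop plus repeated whole-string replace('..','.') fixpoint loop and double slicing.
-- outside the precondition, e.g. on solution('!!'): A raises IndexError, B returns 'aaa'
import Mathlib
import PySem

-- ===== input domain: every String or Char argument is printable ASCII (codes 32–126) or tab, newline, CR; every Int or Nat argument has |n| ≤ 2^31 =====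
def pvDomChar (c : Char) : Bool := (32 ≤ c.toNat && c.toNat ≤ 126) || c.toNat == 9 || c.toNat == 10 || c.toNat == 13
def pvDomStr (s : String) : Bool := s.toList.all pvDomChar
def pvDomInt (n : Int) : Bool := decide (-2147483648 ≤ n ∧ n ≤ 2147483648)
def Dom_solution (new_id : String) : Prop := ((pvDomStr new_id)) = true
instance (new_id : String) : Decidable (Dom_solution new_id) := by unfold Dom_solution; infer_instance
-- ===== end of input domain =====

-- B collapses consecutive dots in the same single pass that lowercases and filters,
-- instead of A's separate filter loop plus repeated whole-string replace('..','.') loop.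

-- ===== PORT A =====
-- one pass of Python's answer.replace('..', '.') — used only to prove termination of the while-loop port
def pvRepOne : List Char → List Char
  | [] => []
  | [c] => [c]
  | a :: b :: t => if a = '.' ∧ b = '.' then '.' :: pvRepOne t else a :: pvRepOne (b :: t)

theorem pvGo_eq (fuel : Nat) (l acc : List Char) (h : l.length ≤ fuel) :
    PySem.Chars.replace.go ['.','.'] ['.'] fuel l acc = acc.reverse ++ pvRepOne l := by
  induction fuel generalizing l acc with
  | zero =>
    have : l = [] := by cases l <;> simp_all
    subst this
    simp [PySem.Chars.replace.go, pvRepOne]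
  | succ n ih =>
    match l with
    | [] => simp [PySem.Chars.replace.go, pvRepOne]
    | [c] =>
      have hp : ¬ (['.','.'].isPrefixOf [c] = true) := by
        simp [List.isPrefixOf_iff_prefix]
      simp only [PySem.Chars.replace.go, hp, if_neg]
      rw [ih [] (c :: acc) (by simp)]
      simp [pvRepOne]
    | a :: b :: t =>
      by_cases hab : a = '.' ∧ b = '.'
      · obtain ⟨rfl, rfl⟩ := hab
        have hp : ['.','.'].isPrefixOf ('.' :: '.' :: t) = true := by
          simp [List.isPrefixOf_iff_prefix]
        simp [PySem.Chars.replace.go, hp, ih t _ (show t.length ≤ n by simp at h; omega), pvRepOne]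
      · have hp : ¬ (['.','.'].isPrefixOf (a :: b :: t) = true) := by
          simp [List.isPrefixOf_iff_prefix, List.cons_prefix_cons]
          intro ha hb; exact hab ⟨ha.symm, hb.symm⟩
        simp only [PySem.Chars.replace.go, hp, if_neg, not_false_iff]
        rw [ih (b :: t) (a :: acc) (by simp at h ⊢; omega)]
        simp [pvRepOne, hab]

theorem pvRepOne_eq_replace (s : List Char) :
    PySem.Chars.replace s ['.', '.'] ['.'] = pvRepOne s := by
  rw [PySem.Chars.replace]
  simp [pvGo_eq s.length s [] le_rfl]

theorem pvRepOne_len_lt (s : List Char) (h : ['.', '.'] <:+: s) :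
    (pvRepOne s).length < s.length := by
  induction s using pvRepOne.induct with
  | case1 => simp at h
  | case2 c =>
    exfalso
    rcases h with ⟨u, v, huv⟩
    have := congrArg List.length huv
    simp at this; omega
  | case3 a b t hab ih =>
    obtain ⟨rfl, rfl⟩ := hab
    have hle : (pvRepOne t).length ≤ t.length := by
      clear h ih
      induction t using pvRepOne.induct with
      | case1 => simp [pvRepOne]
      | case2 c => simp [pvRepOne]
      | case3 a b t hab ih =>
        obtain ⟨rfl, rfl⟩ := hab
        simp [pvRepOne]; omega
      | case4 a b t hab ih => simp [pvRepOne, hab] at ih ⊢; omega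
    simp [pvRepOne]
    omega
  | case4 a b t hab ih =>
    have hi : ['.', '.'] <:+: b :: t := by
      rcases List.infix_cons_iff.mp h with hp | hi
      · exfalso
        rcases List.cons_prefix_cons.mp hp with ⟨rfl, hp2⟩
        rcases List.cons_prefix_cons.mp hp2 with ⟨rfl, _⟩
        exact hab ⟨rfl, rfl⟩
      · exact hi
    have := ih hi
    simp [pvRepOne, hab] at this ⊢
    omega

theorem pvReplace_len (s : List Char) (h : PySem.Chars.isIn ['.', '.'] s = true) :
    (PySem.Chars.replace s ['.', '.'] ['.']).length < s.length := by
  rw [pvRepOne_eq_replace]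
  exact pvRepOne_len_lt s ((PySem.Chars.isIn_iff_infix _ _).mp h)

-- the body of A's for-loop (three branches appending to answer)
def pvAKeep (answer : List Char) (c : Char) : List Char :=
  if 'a' ≤ c ∧ c ≤ 'z' then answer ++ [c]
  else if '0' ≤ c ∧ c ≤ '9' then answer ++ [c]
  else if c ∈ ['-', '_', '.'] then answer ++ [c]
  else answer

-- A's lv3: while '..' in answer: answer = answer.replace('..', '.')
def pvACollapse (s : List Char) : List Char :=
  if PySem.Chars.isIn ['.', '.'] s then pvACollapse (PySem.Chars.replace s ['.', '.'] ['.']) else s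
termination_by s.length
decreasing_by exact pvReplace_len s (by assumption)

-- A's lv7: while len(answer) <= 2: answer += answer[-1]
def pvAPad (s : List Char) : List Char :=
  if s.length ≤ 2 then pvAPad (s ++ [PySem.List.pyGetD s (-1) ' ']) else s
termination_by 3 - s.length
decreasing_by simp; omega

def solution (new_id : String) : String :=
  -- lv1 + lv2 loop
  let answer := (PySem.Chars.lower new_id.toList).foldl pvAKeep []
  -- lv3
  let answer := pvACollapse answer
  -- lv4 (answer[0] / answer[-1]: IndexError on empty answer → excluded by Pre_)
  let answer := if PySem.List.pyGetD answer 0 ' ' = '.'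
      then PySem.List.slice answer (some (-((answer.length : Int) - 1))) none else answer
  let answer := if PySem.List.pyGetD answer (-1) ' ' = '.'
      then PySem.List.slice answer none (some ((answer.length : Int) - 1)) else answer
  -- lv5
  let answer := if answer.length = 0 then answer ++ ['a'] else answer
  -- lv6
  let answer := if 15 < answer.length then PySem.List.slice answer none (some 15) else answer
  let answer := if PySem.List.pyGetD answer (-1) ' ' = '.'
      then PySem.List.slice answer none (some ((answer.length : Int) - 1)) else answer
  -- lv7
  String.ofList (pvAPad answer)

-- ===== PORT B =====
-- the body of B's single fused loop
def pvBStep (buf : List Char) (ch : Char) : List Char :=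
  let c := PySem.Chars.lowerChar ch
  if (PySem.Chars.isalnum c = true ∨ c ∈ ['-', '_', '.'])
      ∧ ¬(c = '.' ∧ buf ≠ [] ∧ PySem.List.pyGetD buf (-1) ' ' = '.')
  then buf ++ [c] else buf

def solution_alt (new_id : String) : String :=
  let buf := new_id.toList.foldl pvBStep []
  let core := PySem.Chars.stripChars buf ['.']
  let core := if core = [] then ['a'] else core
  let core := PySem.Chars.stripChars (PySem.List.slice core none (some 15)) ['.']
  let core := if core.length < 3
      then core ++ List.replicate (3 - core.length) (PySem.List.pyGetD core (-1) ' ')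
      else core
  String.ofList core

-- ===== PRECONDITION & SPEC =====
def pvIsKeep (c : Char) : Bool :=
  ('a' ≤ c && c ≤ 'z') || ('0' ≤ c && c ≤ '9') || (c = '-' || c = '_' || c = '.')

-- Pre_ excludes exactly the inputs with no kept character, on which A's answer[0] raises IndexError
def Pre_solution (new_id : String) : Prop :=
  new_id.toList.any (fun ch => pvIsKeep (PySem.Chars.lowerChar ch)) = true
instance (new_id : String) : Decidable (Pre_solution new_id) := by unfold Pre_solution; infer_instance

def pvWitness_solution : String := "...Bat.Man42.."

def Spec_solution (new_id : String) (out : String) : Prop := out = solution_alt new_id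
instance (new_id : String) (out : String) : Decidable (Spec_solution new_id out) := by unfold Spec_solution; infer_instance

-- ===== CLAIM (what is proved, stated in full; the proofs are below) =====
def Claim_equal_solution : Prop := ∀ (new_id : String), Dom_solution new_id → Pre_solution new_id → Spec_solution new_id (solution new_id)

-- ===== LEMMAS AND PROOFS =====

-- "no two adjacent dots"
def pvNoDD (s : List Char) : Prop := List.IsChain (fun a b => ¬(a = '.' ∧ b = '.')) s

-- the collapse step B's loop performs on a kept character
def pvCollStep (buf : List Char) (c : Char) : List Char :=
  if c = '.' ∧ buf.getLast? = some '.' then buf else buf ++ [c]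

theorem pvDD_iff (s : List Char) : ['.', '.'] <:+: s ↔ ¬ pvNoDD s := by
  induction s with
  | nil => simp [pvNoDD]
  | cons c t ih =>
    rw [List.infix_cons_iff]
    unfold pvNoDD at *
    rw [List.isChain_cons]
    constructor
    · rintro (hp | hi)
      · rcases List.cons_prefix_cons.mp hp with ⟨rfl, hp2⟩
        cases t with
        | nil => simp at hp2
        | cons b t' =>
          rcases List.cons_prefix_cons.mp hp2 with ⟨rfl, _⟩
          intro ⟨h1, _⟩
          exact h1 '.' (by simp) ⟨rfl, rfl⟩
      · intro ⟨_, h2⟩; exact ih.mp hi h2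
    · intro hn
      by_cases hi : ['.', '.'] <:+: t
      · right; exact hi
      · left
        have h2 : List.IsChain (fun a b => ¬(a = '.' ∧ b = '.')) t := by
          by_contra hc; exact hn (absurd (ih.mpr hc) hi)
        by_cases hh : (∀ y ∈ t.head?, ¬(c = '.' ∧ y = '.'))
        · exact absurd ⟨hh, h2⟩ hn
        · push_neg at hh
          rcases hh with ⟨y, hy, hcy⟩
          obtain ⟨rfl, rfl⟩ := hcy
          cases t with
          | nil => simp at hy
          | cons b t' =>
            simp at hy; subst hy
            exact List.cons_prefix_cons.mpr ⟨rfl, List.cons_prefix_cons.mpr ⟨rfl, List.nil_prefix⟩⟩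

theorem pvCollStep_dot (acc : List Char) (h : acc.getLast? = some '.') :
    pvCollStep acc '.' = acc := by simp [pvCollStep, h]

theorem pvCollStep_app (acc : List Char) (c : Char) (h : ¬(c = '.' ∧ acc.getLast? = some '.')) :
    pvCollStep acc c = acc ++ [c] := by simp [pvCollStep]; tauto

theorem pvFoldl_collStep_repOne (s : List Char) (acc : List Char) :
    List.foldl pvCollStep acc (pvRepOne s) = List.foldl pvCollStep acc s := by
  induction s using pvRepOne.induct generalizing acc with
  | case1 => rfl
  | case2 c => rfl
  | case3 a b t hab ih =>
    obtain ⟨rfl, rfl⟩ := hab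
    rw [show pvRepOne ('.' :: '.' :: t) = '.' :: pvRepOne t from by simp [pvRepOne],
       List.foldl_cons, List.foldl_cons, List.foldl_cons, ih]
    congr 1
    by_cases h : acc.getLast? = some '.'
    · rw [pvCollStep_dot acc h, pvCollStep_dot acc h]
    · rw [pvCollStep_app acc '.' (by tauto)]
      rw [pvCollStep_dot _ (by simp)]
  | case4 a b t hab ih =>
    simp only [pvRepOne, if_neg hab, List.foldl_cons]
    exact ih _

theorem pvFoldl_collStep_noDD (s : List Char) (acc : List Char)
    (h : pvNoDD (acc ++ s)) : List.foldl pvCollStep acc s = acc ++ s := by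
  induction s generalizing acc with
  | nil => simp
  | cons c t ih =>
    have hstep : pvCollStep acc c = acc ++ [c] := by
      apply pvCollStep_app
      rintro ⟨rfl, hl⟩
      unfold pvNoDD at h
      rcases List.isChain_append.mp h with ⟨_, _, hx⟩
      exact hx '.' hl '.' (by simp) ⟨rfl, rfl⟩
    rw [List.foldl_cons, hstep, ih (acc ++ [c]) (by simpa using h), List.append_assoc]
    rfl

theorem pvACollapse_eq (s : List Char) : pvACollapse s = List.foldl pvCollStep [] s := by
  induction s using pvACollapse.induct with
  | case1 s h ih =>
    rw [pvACollapse, if_pos h, ih, pvRepOne_eq_replace, pvFoldl_collStep_repOne]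
  | case2 s h =>
    rw [pvACollapse, if_neg h]
    have : pvNoDD s := by
      by_contra hc
      exact h ((PySem.Chars.isIn_iff_infix _ _).mpr ((pvDD_iff s).mpr hc))
    rw [pvFoldl_collStep_noDD s [] (by simpa), List.nil_append]

theorem pvNoDD_foldl (s : List Char) (acc : List Char) (h : pvNoDD acc) :
    pvNoDD (List.foldl pvCollStep acc s) := by
  induction s generalizing acc with
  | nil => exact h
  | cons c t ih =>
    apply ih
    unfold pvCollStep
    split_ifs with hc
    · exact h
    · unfold pvNoDD at *
      rw [List.isChain_append]
      refine ⟨h, by simp, ?_⟩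
      intro x hx y hy
      simp at hy; subst hy
      rintro ⟨rfl, rfl⟩
      exact hc ⟨rfl, hx⟩

theorem pvFoldl_collStep_ne_nil (s : List Char) (acc : List Char)
    (h : acc ≠ [] ∨ s ≠ []) : List.foldl pvCollStep acc s ≠ [] := by
  induction s generalizing acc with
  | nil => simpa using h
  | cons c t ih =>
    rw [List.foldl_cons]
    apply ih
    left
    unfold pvCollStep
    split_ifs with hc
    · rintro rfl; simp at hc
    · simp

theorem pvChar_le_iff (a b : Char) : a ≤ b ↔ a.toNat ≤ b.toNat := by
  rw [Char.le_def]; exact UInt32.le_iff_toNat_le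

theorem pvIsupper_lowerChar (ch : Char) :
    PySem.Chars.isupper (PySem.Chars.lowerChar ch) = false := by
  unfold PySem.Chars.lowerChar
  split_ifs with h
  · unfold PySem.Chars.isupper at h ⊢
    simp only [Bool.and_eq_true, decide_eq_true_eq] at h
    have h1 : 65 ≤ ch.toNat := (pvChar_le_iff _ _).mp h.1
    have h2 : ch.toNat ≤ 90 := (pvChar_le_iff _ _).mp h.2
    have hv : (ch.toNat + 32).isValidChar := by
      left; omega
    have ht : (Char.ofNat (ch.toNat + 32)).toNat = ch.toNat + 32 := by
      rw [Char.toNat_ofNat, if_pos hv]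
    simp only [Bool.and_eq_false_iff, decide_eq_false_iff_not]
    right
    rw [pvChar_le_iff, ht]
    have hz : ('Z' : Char).toNat = 90 := by decide
    omega
  · unfold PySem.Chars.isupper at h ⊢
    simpa using h

theorem pvKeep_iff (ch : Char) :
    (PySem.Chars.isalnum (PySem.Chars.lowerChar ch) = true ∨
      PySem.Chars.lowerChar ch ∈ ['-', '_', '.'])
    ↔ pvIsKeep (PySem.Chars.lowerChar ch) = true := by
  have hu := pvIsupper_lowerChar ch
  unfold PySem.Chars.isalnum PySem.Chars.isalpha at *
  rw [hu]
  unfold PySem.Chars.islower PySem.Chars.isdigit pvIsKeep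
  simp [List.mem_cons]
  tauto

theorem pvLast_iff (buf : List Char) :
    (buf ≠ [] ∧ PySem.List.pyGetD buf (-1) ' ' = '.') ↔ buf.getLast? = some '.' := by
  constructor
  · rintro ⟨hne, hg⟩
    rw [PySem.List.pyGetD_neg_one buf ' ' hne] at hg
    rw [List.getLast?_eq_some_getLast hne, hg]
  · intro h
    have hne : buf ≠ [] := by rintro rfl; simp at h
    refine ⟨hne, ?_⟩
    rw [PySem.List.pyGetD_neg_one buf ' ' hne]
    rw [List.getLast?_eq_some_getLast hne] at h
    exact Option.some_injective _ h

theorem pvAKeep_eq (acc : List Char) (c : Char) :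
    pvAKeep acc c = if pvIsKeep c then acc ++ [c] else acc := by
  unfold pvAKeep pvIsKeep
  split_ifs <;> simp_all <;>
    rcases ‹'a' ≤ c ∧ c ≤ 'z' ∨ '0' ≤ c ∧ c ≤ '9'› with ⟨ha, hb⟩ | ⟨ha, hb⟩
  · exact absurd hb (not_le.mpr (‹'a' ≤ c → 'z' < c› ha))
  · exact absurd hb (not_le.mpr (‹'0' ≤ c → '9' < c› ha))

theorem pvBStep_eq (buf : List Char) (ch : Char) :
    pvBStep buf ch = if pvIsKeep (PySem.Chars.lowerChar ch)
      then pvCollStep buf (PySem.Chars.lowerChar ch) else buf := by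
  unfold pvBStep pvCollStep
  set c := PySem.Chars.lowerChar ch with hc
  by_cases hk : pvIsKeep c = true
  · rw [if_pos hk]
    by_cases hl : c = '.' ∧ buf.getLast? = some '.'
    · rw [if_pos hl, if_neg]
      rintro ⟨_, hcon⟩
      exact hcon ⟨hl.1, ((pvLast_iff buf).mpr hl.2).1, ((pvLast_iff buf).mpr hl.2).2⟩
    · rw [if_neg hl, if_pos]
      refine ⟨(pvKeep_iff ch).mpr hk, ?_⟩
      rintro ⟨h1, h2, h3⟩
      exact hl ⟨h1, (pvLast_iff buf).mp ⟨h2, h3⟩⟩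
  · rw [if_neg hk, if_neg]
    rintro ⟨hor, _⟩
    exact hk ((pvKeep_iff ch).mp hor)

theorem pvRstrip_eq (v : List Char) (h : pvNoDD v) :
    (List.dropWhile (fun c => ['.'].contains c) v.reverse).reverse
      = if v.getLast? = some '.' then v.dropLast else v := by
  induction v using List.reverseRecOn with
  | nil => simp
  | append_singleton w x _ =>
    rw [List.reverse_append]
    by_cases hx : x = '.'
    · subst hx
      have hw : w.getLast? ≠ some '.' := by
        unfold pvNoDD at h
        rcases List.isChain_append.mp h with ⟨_, _, hlast⟩
        intro hc
        exact hlast '.' hc '.' (by simp) ⟨rfl, rfl⟩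
      have hdw : List.dropWhile (fun c => decide (c = '.')) w.reverse = w.reverse := by
        cases hwr : w.reverse with
        | nil => simp
        | cons y ys =>
          have hy : y ≠ '.' := by
            intro hyc
            apply hw
            rw [← List.head?_reverse, hwr, hyc]
            rfl
          simp [List.dropWhile_cons, hy]
      simp [List.dropWhile_cons, hdw]
    · simp [List.dropWhile_cons, hx]

theorem pvRstripA (v : List Char) (h : pvNoDD v) :
    (if PySem.List.pyGetD v (-1) ' ' = '.'
        then PySem.List.slice v none (some ((v.length : Int) - 1)) else v)
      = (List.dropWhile (fun c => ['.'].contains c) v.reverse).reverse := by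
  rw [pvRstrip_eq v h]
  by_cases hl : v.getLast? = some '.'
  · have hv := (pvLast_iff v).mpr hl
    rw [if_pos hv.2, if_pos hl]
    have hlen : (v.length : Int) - 1 = ((v.length - 1 : Nat) : Int) := by
      have : 1 ≤ v.length := List.length_pos_iff.mpr hv.1
      push_cast; omega
    rw [hlen, PySem.List.slice_to_natCast, List.dropLast_eq_take]
  · rw [if_neg hl, if_neg]
    intro hg
    rcases List.eq_nil_or_concat v with rfl | ⟨w, x, rfl⟩
    · exact absurd hg (by decide)
    · exact hl ((pvLast_iff _).mp ⟨by simp, hg⟩)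

theorem pvStripChars_def (s chars : List Char) :
    PySem.Chars.stripChars s chars
      = (List.dropWhile (fun c => chars.contains c)
          (List.dropWhile (fun c => chars.contains c) s).reverse).reverse := rfl

theorem pvStrip_eq (t : List Char) (ht : t ≠ []) (h : pvNoDD t) :
    PySem.Chars.stripChars t ['.']
      = (fun a4a => if PySem.List.pyGetD a4a (-1) ' ' = '.'
            then PySem.List.slice a4a none (some ((a4a.length : Int) - 1)) else a4a)
        (if PySem.List.pyGetD t 0 ' ' = '.'
            then PySem.List.slice t (some (-((t.length : Int) - 1))) none else t) := by
  simp only []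
  rw [pvStripChars_def]
  obtain ⟨c, t'⟩ := List.exists_cons_of_ne_nil ht
  obtain ⟨t', rfl⟩ := t'
  by_cases hc : c = '.'
  · subst hc
    cases t' with
    | nil => decide
    | cons d t'' =>
      have hd : d ≠ '.' := by
        unfold pvNoDD at h
        rcases List.isChain_cons.mp h with ⟨h1, _⟩
        intro hdc
        exact h1 d (by simp) ⟨rfl, hdc⟩
      have hdrop : List.dropWhile (fun c => ['.'].contains c) ('.' :: d :: t'') = d :: t'' := by
        simp [List.dropWhile_cons, hd]
      have hslice : (if PySem.List.pyGetD ('.' :: d :: t'') 0 ' ' = '.'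
          then PySem.List.slice ('.' :: d :: t'')
            (some (-((('.' :: d :: t'').length : Int) - 1))) none else ('.' :: d :: t''))
          = d :: t'' := by
        rw [if_pos (by rw [PySem.List.pyGetD_zero_cons])]
        have hlen : -((('.' :: d :: t'').length : Int) - 1)
            = -(((t''.length + 1 : Nat) : Int)) := by push_cast; simp
        rw [hlen, PySem.List.slice_from_neg_natCast _ _ (by omega)]
        simp
      rw [hslice, hdrop]
      exact (pvRstripA (d :: t'') (by
        unfold pvNoDD at h ⊢
        exact (List.isChain_cons.mp h).2)).symm
  · have hdrop : List.dropWhile (fun c => ['.'].contains c) (c :: t') = c :: t' := by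
      simp [List.dropWhile_cons, hc]
    have hget : PySem.List.pyGetD (c :: t') 0 ' ' = c := PySem.List.pyGetD_zero_cons _ _ _
    have hin : (if PySem.List.pyGetD (c :: t') 0 ' ' = '.'
        then PySem.List.slice (c :: t') (some (-(((c :: t').length : Int) - 1))) none
        else c :: t') = c :: t' := if_neg (by rw [hget]; exact hc)
    rw [hdrop, hin]
    exact (pvRstripA (c :: t') h).symm

theorem pvPad_stop (w : List Char) (h : ¬ w.length ≤ 2) : pvAPad w = w := by
  rw [pvAPad, if_neg h]

theorem pvPad_eq (w : List Char) (hw : w ≠ []) :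
    pvAPad w = if w.length < 3
      then w ++ List.replicate (3 - w.length) (PySem.List.pyGetD w (-1) ' ') else w := by
  match w, hw with
  | [a], _ =>
    have h1 : PySem.List.pyGetD [a] (-1) ' ' = a := by
      rw [PySem.List.pyGetD_neg_one [a] ' ' (by simp)]; rfl
    rw [pvAPad, if_pos (by simp), h1]
    have h2 : PySem.List.pyGetD [a, a] (-1) ' ' = a := by
      rw [PySem.List.pyGetD_neg_one [a, a] ' ' (by simp)]; rfl
    rw [show [a] ++ [a] = [a, a] from rfl, pvAPad, if_pos (by simp), h2]
    rw [show [a, a] ++ [a] = [a, a, a] from rfl, pvPad_stop _ (by simp)]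
    simp [h1, List.replicate]
  | [a, b], _ =>
    have h1 : PySem.List.pyGetD [a, b] (-1) ' ' = b := by
      rw [PySem.List.pyGetD_neg_one [a, b] ' ' (by simp)]; rfl
    rw [pvAPad, if_pos (by simp), h1]
    rw [show [a, b] ++ [b] = [a, b, b] from rfl, pvPad_stop _ (by simp)]
    simp [h1, List.replicate]
  | a :: b :: c :: t, _ =>
    rw [pvPad_stop _ (by simp), if_neg (by simp)]

theorem pvNoDD_nil : pvNoDD [] := by unfold pvNoDD; exact List.IsChain.nil

theorem pvNoDD_reverse (l : List Char) (h : pvNoDD l) : pvNoDD l.reverse := by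
  unfold pvNoDD at *
  rw [List.isChain_reverse]
  exact h.imp (by tauto)

theorem pvStrip_noDD (t : List Char) (h : pvNoDD t) :
    pvNoDD (PySem.Chars.stripChars t ['.']) := by
  rw [pvStripChars_def]
  apply pvNoDD_reverse
  exact List.IsChain.suffix
    (pvNoDD_reverse _ (List.IsChain.suffix h (List.dropWhile_suffix _)))
    (List.dropWhile_suffix _)

theorem pvPrefix_head {α : Type} (l' l : List α) (h : l' <+: l) (hne : l' ≠ []) :
    l'.head? = l.head? := by
  rcases l' with _ | ⟨a, t⟩
  · exact absurd rfl hne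
  · rcases h with ⟨u, rfl⟩; simp

theorem pvRstrip_prefix (l : List Char) (p : Char → Bool) :
    (List.dropWhile p l.reverse).reverse <+: l := by
  have h := List.dropWhile_suffix (l := l.reverse) p
  have := List.reverse_prefix.mpr h
  simpa using this

theorem pvStrip_head (t : List Char)
    (hne : PySem.Chars.stripChars t ['.'] ≠ []) :
    (PySem.Chars.stripChars t ['.']).head? ≠ some '.' := by
  rw [pvStripChars_def] at hne ⊢
  intro hc
  have hpre : (List.dropWhile (fun c => ['.'].contains c)
      (List.dropWhile (fun c => ['.'].contains c) t).reverse).reverse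
      <+: List.dropWhile (fun c => ['.'].contains c) t := pvRstrip_prefix _ _
  have hhead := pvPrefix_head _ _ hpre hne
  rw [hc] at hhead
  have := List.head?_dropWhile_not (fun c => ['.'].contains c) t
  rw [← hhead] at this
  simp at this

-- A's lv4–lv7 chain equals B's strip/truncate/pad chain, for the collapsed nonempty string
theorem pvTail_eq (t : List Char) (ht : t ≠ []) (hnd : pvNoDD t) :
    (let a4a := if PySem.List.pyGetD t 0 ' ' = '.'
        then PySem.List.slice t (some (-((t.length : Int) - 1))) none else t
     let a4 := if PySem.List.pyGetD a4a (-1) ' ' = '.'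
        then PySem.List.slice a4a none (some ((a4a.length : Int) - 1)) else a4a
     let a5 := if a4.length = 0 then a4 ++ ['a'] else a4
     let a6 := if 15 < a5.length then PySem.List.slice a5 none (some 15) else a5
     let a6b := if PySem.List.pyGetD a6 (-1) ' ' = '.'
        then PySem.List.slice a6 none (some ((a6.length : Int) - 1)) else a6
     pvAPad a6b)
    = (let core := PySem.Chars.stripChars t ['.']
       let core := if core = [] then ['a'] else core
       let core := PySem.Chars.stripChars (PySem.List.slice core none (some 15)) ['.']
       if core.length < 3
         then core ++ List.replicate (3 - core.length) (PySem.List.pyGetD core (-1) ' ')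
         else core) := by
  have hstrip := pvStrip_eq t ht hnd
  simp only [] at hstrip ⊢
  rw [← hstrip]
  -- lv5: same conditional
  have h5 : (if (PySem.Chars.stripChars t ['.']).length = 0
      then PySem.Chars.stripChars t ['.'] ++ ['a'] else PySem.Chars.stripChars t ['.'])
      = (if PySem.Chars.stripChars t ['.'] = [] then ['a'] else PySem.Chars.stripChars t ['.']) := by
    split_ifs with h1 h2 <;> simp_all
  rw [h5]
  set u := if PySem.Chars.stripChars t ['.'] = [] then ['a'] else PySem.Chars.stripChars t ['.'] with hu
  have hune : u ≠ [] := by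
    rw [hu]; split_ifs with h1
    · simp
    · exact h1
  have hund : pvNoDD u := by
    rw [hu]; split_ifs with h1
    · unfold pvNoDD; simp
    · exact pvStrip_noDD t hnd
  have huh : u.head? ≠ some '.' := by
    rw [hu]; split_ifs with h1
    · simp
    · exact pvStrip_head t h1
  -- lv6 truncation: both sides are take 15 u
  have hsl : PySem.List.slice u none (some 15) = u.take 15 := by
    simpa using PySem.List.slice_to_natCast u 15
  have h6 : (if 15 < u.length then PySem.List.slice u none (some 15) else u) = u.take 15 := by
    split_ifs with h1
    · exact hsl
    · exact (List.take_of_length_le (by omega)).symm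
  rw [h6, hsl]
  set v := u.take 15 with hv
  have hvne : v ≠ [] := by
    rw [hv]
    intro h1
    rcases List.take_eq_nil_iff.mp h1 with h2 | h2
    · exact absurd h2 (by norm_num)
    · exact hune h2
  have hvnd : pvNoDD v := List.IsChain.prefix hund (List.take_prefix 15 u)
  have hvh : v.head? ≠ some '.' := by
    rw [hv, List.head?_take, if_neg (by omega)]
    exact huh
  -- the second trailing-dot trim is stripChars on v (leading strip is a no-op)
  have hlstrip : List.dropWhile (fun c => ['.'].contains c) v = v := by
    cases hvv : v with
    | nil => rfl
    | cons a w =>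
      have : a ≠ '.' := by
        intro h1; apply hvh; rw [hvv, h1]; rfl
      simp [List.dropWhile_cons, this]
  have h6b : (if PySem.List.pyGetD v (-1) ' ' = '.'
      then PySem.List.slice v none (some ((v.length : Int) - 1)) else v)
      = PySem.Chars.stripChars v ['.'] := by
    rw [pvRstripA v hvnd, pvStripChars_def, hlstrip]
  rw [h6b]
  set w := PySem.Chars.stripChars v ['.'] with hw
  have hwne : w ≠ [] := by
    rw [hw, pvStripChars_def, hlstrip]
    rw [pvRstrip_eq v hvnd]
    split_ifs with h1
    · rcases v with _ | ⟨a, _ | ⟨b, w'⟩⟩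
      · exact absurd rfl hvne
      · exfalso
        apply hvh
        have : a = '.' := by simpa using h1
        simp [this]
      · simp
    · exact hvne
  rw [pvPad_eq w hwne]

-- ===== VERDICT (by name: the statement is the Claim_ definition above) =====
theorem solution_spec : Claim_equal_solution := by
  intro s _ hpre
  unfold Spec_solution
  unfold Pre_solution at hpre
  obtain ⟨x, hx, hkx⟩ := List.any_eq_true.mp hpre
  have hfne : ((s.toList.map PySem.Chars.lowerChar).filter pvIsKeep) ≠ [] :=
    List.ne_nil_of_mem (List.mem_filter.mpr ⟨List.mem_map_of_mem hx, hkx⟩)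
  have ht := pvFoldl_collStep_ne_nil ((s.toList.map PySem.Chars.lowerChar).filter pvIsKeep)
    [] (Or.inr hfne)
  have hnd := pvNoDD_foldl ((s.toList.map PySem.Chars.lowerChar).filter pvIsKeep) [] pvNoDD_nil
  have htail := pvTail_eq _ ht hnd
  simp only [] at htail
  have hA : List.foldl pvAKeep [] (s.toList.map PySem.Chars.lowerChar)
      = (s.toList.map PySem.Chars.lowerChar).filter pvIsKeep := by
    have hf : pvAKeep = fun acc c => if pvIsKeep c then acc ++ [c] else acc :=
      funext fun a => funext fun c => pvAKeep_eq a c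
    rw [hf]
    simpa using PySem.List.foldl_append_if pvIsKeep id (s.toList.map PySem.Chars.lowerChar) []
  have hB : List.foldl pvBStep [] s.toList
      = List.foldl pvCollStep [] ((s.toList.map PySem.Chars.lowerChar).filter pvIsKeep) := by
    have hf : pvBStep = fun buf ch => if pvIsKeep (PySem.Chars.lowerChar ch)
        then pvCollStep buf (PySem.Chars.lowerChar ch) else buf :=
      funext fun a => funext fun c => pvBStep_eq a c
    rw [hf, List.foldl_filter, List.foldl_map]
  unfold solution solution_alt
  simp only [PySem.Chars.lower]
  rw [hA, hB, pvACollapse_eq]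
  exact congrArg String.ofList htail
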